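-- pv_equiv track=rewrite | github.com/Lukifuki1/Mia | mia/core/world_model.py | _are_contradictory_relations
-- ===== SOURCE A (Python) =====
-- def _are_contradictory_relations(rel_type1: str, rel_type2: str) -> bool:
--     """Check if two relation types are contradictory"""
--     contradictory_pairs = [
--         ("similar_to", "opposite_of"),
--         ("causes", "prevents"),
--         ("enables", "disables")
--     ]
--
--     for pair in contradictory_pairs:
--         if (rel_type1 in pair and rel_type2 in pair and rel_type1 != rel_type2):
--             return True
--
--     return False
-- ===== SOURCE B (Python) =====
-- _RELS = ("similar_to", "opposite_of", "causes", "prevents", "enables", "disables")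
--
--
-- def _are_contradictory_relations(rel_type1: str, rel_type2: str) -> bool:
--     """Check if two relation types are contradictory"""
--     try:
--         i = _RELS.index(rel_type1)
--         j = _RELS.index(rel_type2)
--     except ValueError:
--         return False
--     return j == i ^ 1
-- ===== Notes on version B (the rewrite author's own statement) =====
-- stated objective: alternative
-- what changed: Replaces the scan over contradictory pairs (with in-pair membership and inequality tests) by an index encoding: each relation gets its position in one flat tuple where contradictory partners sit at even/odd adjacent indices, so the check becomes j == i ^ 1 on the two indices.
import Mathlib
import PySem

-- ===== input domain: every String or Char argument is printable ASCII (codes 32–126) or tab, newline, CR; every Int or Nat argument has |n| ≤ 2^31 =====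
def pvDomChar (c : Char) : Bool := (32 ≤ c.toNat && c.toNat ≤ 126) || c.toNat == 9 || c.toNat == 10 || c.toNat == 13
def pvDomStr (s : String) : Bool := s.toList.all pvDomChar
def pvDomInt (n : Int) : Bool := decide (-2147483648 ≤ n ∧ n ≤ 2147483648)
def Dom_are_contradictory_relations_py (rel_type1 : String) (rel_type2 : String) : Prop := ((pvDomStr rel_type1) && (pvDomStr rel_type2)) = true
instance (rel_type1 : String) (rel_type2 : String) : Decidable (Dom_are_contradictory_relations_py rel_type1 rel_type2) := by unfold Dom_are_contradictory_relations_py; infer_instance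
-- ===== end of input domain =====

-- B replaces A's scan over contradictory pairs by an index encoding in one flat list
-- where partners sit at adjacent even/odd positions, checked with j == i ^^^ 1 (alternative).

-- ===== PORT A =====
-- the loop over contradictory_pairs; 'rel in pair' is tuple membership
def pvScanPairs (rel_type1 rel_type2 : String) : List (String × String) → Bool
  | [] => false
  | (a, b) :: rest =>
    if ((rel_type1 == a || rel_type1 == b) && (rel_type2 == a || rel_type2 == b)
        && rel_type1 != rel_type2) then
      true
    else
      pvScanPairs rel_type1 rel_type2 rest

def are_contradictory_relations_py (rel_type1 : String) (rel_type2 : String) : Bool :=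
  pvScanPairs rel_type1 rel_type2
    [("similar_to", "opposite_of"), ("causes", "prevents"), ("enables", "disables")]

-- ===== PORT B =====
def pvRels : List String :=
  ["similar_to", "opposite_of", "causes", "prevents", "enables", "disables"]

-- _RELS.index raising ValueError → index? returning none → except branch returns false
def are_contradictory_relations_py_alt (rel_type1 : String) (rel_type2 : String) : Bool :=
  match PySem.List.index? pvRels rel_type1, PySem.List.index? pvRels rel_type2 with
  | some i, some j => j == i ^^^ 1
  | _, _ => false

-- ===== PRECONDITION & SPEC =====
def Spec_are_contradictory_relations_py (rel_type1 : String) (rel_type2 : String) (out : Bool) : Prop := out = are_contradictory_relations_py_alt rel_type1 rel_type2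
instance (rel_type1 : String) (rel_type2 : String) (out : Bool) : Decidable (Spec_are_contradictory_relations_py rel_type1 rel_type2 out) := by unfold Spec_are_contradictory_relations_py; infer_instance

-- ===== CLAIM (what is proved, stated in full; the proofs are below) =====
def Claim_equal_are_contradictory_relations_py : Prop := ∀ (rel_type1 : String) (rel_type2 : String), Dom_are_contradictory_relations_py rel_type1 rel_type2 → Spec_are_contradictory_relations_py rel_type1 rel_type2 (are_contradictory_relations_py rel_type1 rel_type2)

-- ===== LEMMAS AND PROOFS =====

lemma pvIdx_eq (r : String) : PySem.List.index? pvRels r =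
    if r = "similar_to" then some 0 else if r = "opposite_of" then some 1
    else if r = "causes" then some 2 else if r = "prevents" then some 3
    else if r = "enables" then some 4 else if r = "disables" then some 5 else none := by
  split_ifs with h1 h2 h3 h4 h5 h6
  · subst h1; decide
  · subst h2; decide
  · subst h3; decide
  · subst h4; decide
  · subst h5; decide
  · subst h6; decide
  · rw [PySem.List.index?_eq_none_iff]; simp [pvRels]; tauto

-- ===== VERDICT (by name: the statement is the Claim_ definition above) =====
theorem are_contradictory_relations_py_spec : Claim_equal_are_contradictory_relations_py := by
  intro r1 r2 _
  unfold Spec_are_contradictory_relations_py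
  simp only [are_contradictory_relations_py_alt, pvIdx_eq]
  split_ifs <;>
    simp_all [are_contradictory_relations_py, pvScanPairs, ne_comm]
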